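-- pv_equiv track=rewrite | github.com/AP-MI-2021/lab-2-tudorsuiu | main.py | is_antipalindrome
-- ===== SOURCE A (Python) =====
-- def is_antipalindrome(n: int) -> bool:
--     """
--     Determina daca un numar n este antipalindrom
--     :param n: nr. intreg
--     :return: True daca n este antipalindrom si False in caz contrar
--     """
--     n = abs(n)
--     cn = n
--     nr_cifre = 0
--     # Determinam cate cifre are numarul citit
--     while cn != 0:
--         nr_cifre += 1
--         cn = cn // 10
--     # Determinam daca numarul citit este antipalindrom
--     while n > 9:
--         if n // (10 ** (nr_cifre - 1)) == n % 10:
--             return False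
--         n = n % (10 ** (nr_cifre - 1))
--         n = n // 10
--         nr_cifre -= 2
--     return True
-- ===== SOURCE B (Python) =====
-- def is_antipalindrome(n: int) -> bool:
--     n = abs(n)
--     ds = []
--     while n:
--         ds.append(n % 10)
--         n //= 10
--     return all(ds[i] != ds[len(ds) - 1 - i] for i in range(len(ds) // 2))
-- ===== Notes on version B (the rewrite author's own statement) =====
-- stated objective: simpler
-- what changed: B extracts the digits once into a list and compares mirrored positions by index, replacing A's separate digit-count loop and its two-ended stripping arithmetic with 10**(nr_cifre-1) quotients/remainders.
-- intended difference: On numbers whose decimal digits, after stripping some outermost pairwise-distinct mirrored pairs, leave a middle part whose numeric value is a single digit although it spans several digit positions and still contains an equal mirrored digit pair (e.g. 1000, 5006), A loses the middle's leading zeros, stops early and returns True, while B returns False; B is intended since such numbers do contain an equal mirrored digit pair. — e.g. on is_antipalindrome(1000): A returns true, B returns false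
import Mathlib
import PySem

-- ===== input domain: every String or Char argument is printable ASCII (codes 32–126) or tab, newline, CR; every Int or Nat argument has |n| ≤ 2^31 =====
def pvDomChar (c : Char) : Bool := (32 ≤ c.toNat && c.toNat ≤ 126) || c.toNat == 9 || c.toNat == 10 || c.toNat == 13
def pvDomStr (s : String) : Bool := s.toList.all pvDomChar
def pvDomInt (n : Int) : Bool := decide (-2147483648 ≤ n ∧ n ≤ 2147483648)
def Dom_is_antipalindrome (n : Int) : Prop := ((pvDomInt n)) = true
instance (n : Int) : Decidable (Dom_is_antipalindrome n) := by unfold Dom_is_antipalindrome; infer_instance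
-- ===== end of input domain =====

-- B builds the digit list once and compares mirrored positions by index, dropping A's
-- separate digit-count loop and A's two-ended stripping with 10**(k-1) arithmetic
-- (objective: simpler); on inputs in D_ below A early-exits with the wrong value.

-- ===== PORT A =====
-- first while loop of A: count the digits of cn
def aCount (cn : Nat) : Nat :=
  if cn = 0 then 0 else aCount (cn / 10) + 1
decreasing_by exact Nat.div_lt_self (Nat.pos_of_ne_zero (by assumption)) (by norm_num)

-- second while loop of A: strip the two end digits while n > 9 (all values nonneg, Nat ops = Python // % ** here)
def aLoop (n k : Nat) : Bool :=
  if h : n > 9 then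
    if n / 10 ^ (k - 1) = n % 10 then false
    else aLoop (n % 10 ^ (k - 1) / 10) (k - 2)
  else true
termination_by n
decreasing_by
  calc n % 10 ^ (k - 1) / 10 ≤ n / 10 := Nat.div_le_div_right (Nat.mod_le _ _)
    _ < n := Nat.div_lt_self (by omega) (by norm_num)

def is_antipalindrome (n : Int) : Bool :=
  aLoop n.natAbs (aCount n.natAbs)

-- ===== PORT B =====
-- B's while loop: extract the digits low-to-high into a list (values nonneg, Nat ops exact)
def bDigits (n : Nat) : List Nat :=
  if n = 0 then [] else n % 10 :: bDigits (n / 10)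
decreasing_by exact Nat.div_lt_self (Nat.pos_of_ne_zero (by assumption)) (by norm_num)

-- ds[i] and ds[len(ds)-1-i] are ported as getD: both indices are provably in range, so this is exact
def is_antipalindrome_alt (n : Int) : Bool :=
  let ds := bDigits n.natAbs
  (List.range (ds.length / 2)).all (fun i => ds.getD i 0 ≠ ds.getD (ds.length - 1 - i) 0)

-- ===== PRECONDITION & SPEC =====
-- digit i (from the low end) of m; used only by D_ and the proofs, not by the ports
def pvDig (m i : Nat) : Nat := m / 10 ^ i % 10

-- On numbers whose decimal digits, after stripping some outermost pairwise-distinct mirrored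
-- pairs, leave a middle part whose numeric value is a single digit although it spans several
-- digit positions and still contains an equal mirrored digit pair (e.g. 1000, 5006), A loses the
-- middle's leading zeros, stops early and returns True, while B returns False; B is intended
-- since such numbers do contain an equal mirrored digit pair.
def D_is_antipalindrome (n : Int) : Prop :=
  let m := n.natAbs
  let L := (Nat.digits 10 m).length
  ∃ j, j < L + 1 ∧
    (∀ i, i < j → pvDig m i ≠ pvDig m (L - 1 - i)) ∧
    (∀ p, p < L → j + 1 ≤ p → p ≤ L - 1 - j → pvDig m p = 0) ∧
    (∃ i, i < L ∧ j ≤ i ∧ 2 * i + 2 ≤ L ∧ pvDig m i = pvDig m (L - 1 - i))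
instance (n : Int) : Decidable (D_is_antipalindrome n) := by unfold D_is_antipalindrome; infer_instance

def Spec_is_antipalindrome (n : Int) (out : Bool) : Prop := ¬ D_is_antipalindrome n → out = is_antipalindrome_alt n
instance (n : Int) (out : Bool) : Decidable (Spec_is_antipalindrome n out) := by unfold Spec_is_antipalindrome; infer_instance

def pvDiffWitness_is_antipalindrome : Int := (1000)
def pvDiffWitnessOut_is_antipalindrome : Bool × Bool := (true, false)

-- ===== CLAIM (what is proved, stated in full; the proofs are below) =====
def Claim_unchanged_is_antipalindrome : Prop := ∀ (n : Int), Dom_is_antipalindrome n → Spec_is_antipalindrome n (is_antipalindrome n)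
def Claim_changed_is_antipalindrome : Prop := Dom_is_antipalindrome (pvDiffWitness_is_antipalindrome) ∧ D_is_antipalindrome (pvDiffWitness_is_antipalindrome) ∧ is_antipalindrome (pvDiffWitness_is_antipalindrome) = pvDiffWitnessOut_is_antipalindrome.1 ∧ is_antipalindrome_alt (pvDiffWitness_is_antipalindrome) = pvDiffWitnessOut_is_antipalindrome.2 ∧ pvDiffWitnessOut_is_antipalindrome.1 ≠ pvDiffWitnessOut_is_antipalindrome.2
def Claim_exact_is_antipalindrome : Prop := ∀ (n : Int), Dom_is_antipalindrome n → D_is_antipalindrome n → is_antipalindrome n ≠ is_antipalindrome_alt n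

-- ===== LEMMAS AND PROOFS =====

-- "all mirrored pairs of the k-digit (zero-padded) representation of v differ"
def Bpred (v k : Nat) : Prop := ∀ i, 2 * i + 2 ≤ k → pvDig v i ≠ pvDig v (k - 1 - i)

-- state-level version of D_ on a padded state (v, k)
def Dpred (v k : Nat) : Prop :=
  ∃ j, (∀ i, i < j → pvDig v i ≠ pvDig v (k - 1 - i)) ∧
    (∀ p, j + 1 ≤ p → p ≤ k - 1 - j → pvDig v p = 0) ∧
    (∃ i, j ≤ i ∧ 2 * i + 2 ≤ k ∧ pvDig v i = pvDig v (k - 1 - i))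

theorem bDigits_eq (n : Nat) : bDigits n = Nat.digits 10 n := by
  induction n using Nat.strong_induction_on with
  | _ n ih =>
    rw [bDigits]
    by_cases h : n = 0
    · simp [h]
    · rw [if_neg h, Nat.digits_def' (by norm_num : 1 < 10) (Nat.pos_of_ne_zero h),
        ih (n / 10) (Nat.div_lt_self (Nat.pos_of_ne_zero h) (by norm_num))]

theorem aCount_eq (n : Nat) : aCount n = (Nat.digits 10 n).length := by
  induction n using Nat.strong_induction_on with
  | _ n ih =>
    rw [aCount]
    by_cases h : n = 0
    · simp [h]
    · rw [if_neg h, Nat.digits_def' (by norm_num : 1 < 10) (Nat.pos_of_ne_zero h),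
        ih (n / 10) (Nat.div_lt_self (Nat.pos_of_ne_zero h) (by norm_num))]
      simp

theorem digits_getD (n i : Nat) : (Nat.digits 10 n).getD i 0 = pvDig n i := by
  induction n using Nat.strong_induction_on generalizing i with
  | _ n ih =>
    by_cases h : n = 0
    · simp [h, pvDig]
    · rw [Nat.digits_def' (by norm_num : 1 < 10) (Nat.pos_of_ne_zero h)]
      cases i with
      | zero => simp [pvDig]
      | succ i =>
        simp only [List.getD_cons_succ]
        rw [ih (n / 10) (Nat.div_lt_self (Nat.pos_of_ne_zero h) (by norm_num)) i]
        simp [pvDig, Nat.div_div_eq_div_mul, pow_succ']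

-- all digits of v below its (padded) length are zero → v = 0
theorem eq_zero_of_digits_zero (k : Nat) : ∀ v, v < 10 ^ k →
    (∀ p, p < k → pvDig v p = 0) → v = 0 := by
  induction k with
  | zero => intro v hv _; simpa using hv
  | succ k ih =>
    intro v hv h
    have h0 : v % 10 = 0 := by have := h 0 (by omega); simpa [pvDig] using this
    have hd : v / 10 = 0 := by
      refine ih (v / 10) ?_ ?_
      · exact Nat.div_lt_of_lt_mul (by rwa [pow_succ'] at hv)
      · intro p hp
        have := h (p + 1) (by omega)
        simpa [pvDig, Nat.div_div_eq_div_mul, pow_succ'] using this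
    omega

-- the top (padded) digit: v / 10^(k-1) = pvDig v (k-1) when v < 10^k
theorem top_digit (v k : Nat) (hk : 1 ≤ k) (hv : v < 10 ^ k) :
    v / 10 ^ (k - 1) = pvDig v (k - 1) := by
  unfold pvDig
  have h10 : v / 10 ^ (k - 1) < 10 := by
    apply Nat.div_lt_of_lt_mul
    calc v < 10 ^ k := hv
      _ = 10 ^ (k - 1) * 10 := by rw [← pow_succ]; congr 1; omega
  exact (Nat.mod_eq_of_lt h10).symm

-- digit shift under one strip: digit t of v % 10^(k-1) / 10 is digit (t+1) of v, for t < k-2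
theorem dig_strip (v k t : Nat) (hk : 2 ≤ k) (ht : t < k - 2) :
    pvDig (v % 10 ^ (k - 1) / 10) t = pvDig v (t + 1) := by
  unfold pvDig
  rw [Nat.div_div_eq_div_mul, ← pow_succ']
  have hsplit : (10 : Nat) ^ (k - 1) = 10 ^ (t + 1) * 10 ^ (k - 1 - (t + 1)) := by
    rw [← pow_add]; congr 1; omega
  rw [hsplit, Nat.mod_mul_right_div_self,
    Nat.mod_mod_of_dvd _ (dvd_pow_self 10 (show k - 1 - (t + 1) ≠ 0 by omega))]

theorem strip_lt (v k : Nat) (hk : 2 ≤ k) :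
    v % 10 ^ (k - 1) / 10 < 10 ^ (k - 2) := by
  apply Nat.div_lt_of_lt_mul
  calc v % 10 ^ (k - 1) < 10 ^ (k - 1) := Nat.mod_lt _ (by positivity)
    _ = 10 * 10 ^ (k - 2) := by rw [← pow_succ']; congr 1; omega

-- Bpred transfer through one strip, given the end pair is distinct
theorem Bpred_strip (v k : Nat) (hk : 2 ≤ k)
    (hne : pvDig v 0 ≠ pvDig v (k - 1)) :
    (Bpred (v % 10 ^ (k - 1) / 10) (k - 2) ↔ Bpred v k) := by
  constructor
  · intro hB i hi
    cases i with
    | zero => simpa using hne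
    | succ i =>
      have e1 := dig_strip v k i hk (by omega)
      have e2 := dig_strip v k (k - 2 - 1 - i) hk (by omega)
      have e3 : k - 2 - 1 - i + 1 = k - 1 - (i + 1) := by omega
      have h' := hB i (by omega)
      rwa [e1, e2, e3] at h'
  · intro hB i hi
    have e1 := dig_strip v k i hk (by omega)
    have e2 := dig_strip v k (k - 2 - 1 - i) hk (by omega)
    have e3 : k - 2 - 1 - i + 1 = k - 1 - (i + 1) := by omega
    rw [e1, e2, e3]
    exact hB (i + 1) (by omega)

-- Dpred transfer through one strip, given the end pair is distinct
theorem Dpred_strip_mp (v k : Nat) (hk : 2 ≤ k)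
    (hne : pvDig v 0 ≠ pvDig v (k - 1)) (hD : Dpred v k) :
    Dpred (v % 10 ^ (k - 1) / 10) (k - 2) := by
  obtain ⟨j, h1, h2, i, hji, hik, heq⟩ := hD
  have hi1 : 1 ≤ i := by
    rcases Nat.eq_zero_or_pos i with hi0 | h
    · exfalso; apply hne; rw [hi0] at heq; simpa using heq
    · exact h
  have epair : ∀ hlt : i - 1 < k - 2 - 2 + 2,
      pvDig (v % 10 ^ (k - 1) / 10) (i - 1) = pvDig (v % 10 ^ (k - 1) / 10) (k - 2 - 1 - (i - 1)) := by
    intro _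
    have e1 := dig_strip v k (i - 1) hk (by omega)
    have e2 := dig_strip v k (k - 2 - 1 - (i - 1)) hk (by omega)
    have f1 : i - 1 + 1 = i := by omega
    have f2 : k - 2 - 1 - (i - 1) + 1 = k - 1 - i := by omega
    rw [e1, e2, f1, f2]
    exact heq
  rcases Nat.eq_zero_or_pos j with hj0 | hj1
  · subst hj0
    refine ⟨0, by omega, ?_, i - 1, by omega, by omega, epair (by omega)⟩
    intro p hp hp'
    rw [dig_strip v k p hk (by omega)]
    exact h2 (p + 1) (by omega) (by omega)
  · refine ⟨j - 1, ?_, ?_, i - 1, by omega, by omega, epair (by omega)⟩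
    · intro t ht
      have e1 := dig_strip v k t hk (by omega)
      have e2 := dig_strip v k (k - 2 - 1 - t) hk (by omega)
      have f2 : k - 2 - 1 - t + 1 = k - 1 - (t + 1) := by omega
      rw [e1, e2, f2]
      exact h1 (t + 1) (by omega)
    · intro p hp hp'
      rw [dig_strip v k p hk (by omega)]
      exact h2 (p + 1) (by omega) (by omega)

theorem Dpred_strip_mpr (v k : Nat) (hk : 2 ≤ k)
    (hne : pvDig v 0 ≠ pvDig v (k - 1))
    (hD : Dpred (v % 10 ^ (k - 1) / 10) (k - 2)) : Dpred v k := by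
  obtain ⟨j, h1, h2, i, hji, hik, heq⟩ := hD
  refine ⟨j + 1, ?_, ?_, i + 1, by omega, by omega, ?_⟩
  · intro t ht
    cases t with
    | zero => exact hne
    | succ t =>
      have h' := h1 t (by omega)
      have e1 := dig_strip v k t hk (by omega)
      have e2 := dig_strip v k (k - 2 - 1 - t) hk (by omega)
      have f2 : k - 2 - 1 - t + 1 = k - 1 - (t + 1) := by omega
      rwa [e1, e2, f2] at h'
  · intro p hp hp'
    have h' := h2 (p - 1) (by omega) (by omega)
    have e1 := dig_strip v k (p - 1) hk (by omega)
    have f1 : p - 1 + 1 = p := by omega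
    rwa [e1, f1] at h'
  · have e1 := dig_strip v k i hk (by omega)
    have e2 := dig_strip v k (k - 2 - 1 - i) hk (by omega)
    have f2 : k - 2 - 1 - i + 1 = k - 1 - (i + 1) := by omega
    rwa [e1, e2, f2] at heq

-- if the end pair is EQUAL, Dpred cannot hold for v > 9
theorem not_Dpred_of_eq (v k : Nat) (hk : 2 ≤ k) (hv : v < 10 ^ k) (h9 : 9 < v)
    (heq : pvDig v 0 = pvDig v (k - 1)) : ¬ Dpred v k := by
  rintro ⟨j, h1, h2, -⟩
  rcases Nat.eq_zero_or_pos j with hj0 | hj1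
  · subst hj0
    have hd : v / 10 = 0 := by
      refine eq_zero_of_digits_zero (k - 1) (v / 10) ?_ ?_
      · apply Nat.div_lt_of_lt_mul
        calc v < 10 ^ k := hv
          _ = 10 * 10 ^ (k - 1) := by rw [← pow_succ']; congr 1; omega
      · intro p hp
        have := h2 (p + 1) (by omega) (by omega)
        simpa [pvDig, Nat.div_div_eq_div_mul, pow_succ'] using this
    omega
  · exact h1 0 hj1 heq

theorem small_k (v k : Nat) (hv : v < 10 ^ k) (h9 : 9 < v) : 2 ≤ k := by
  by_contra h
  have : k = 0 ∨ k = 1 := by omega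
  rcases this with h0 | h1
  · rw [h0] at hv; simp at hv; omega
  · rw [h1] at hv; simp at hv; omega

-- condition of A's inner if, rephrased through pvDig
theorem cond_iff (v k : Nat) (hk : 1 ≤ k) (hv : v < 10 ^ k) :
    (v / 10 ^ (k - 1) = v % 10) ↔ pvDig v (k - 1) = pvDig v 0 := by
  rw [top_digit v k hk hv]
  constructor
  · intro h; rw [h]; simp [pvDig]
  · intro h; rw [h]; simp [pvDig]

-- main induction: under ¬Dpred, A's loop agrees with the mirrored-pair predicate
theorem aLoop_char (v : Nat) : ∀ k, v < 10 ^ k → ¬ Dpred v k →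
    (aLoop v k = true ↔ Bpred v k) := by
  induction v using Nat.strong_induction_on with
  | _ v ih =>
    intro k hv hD
    rw [aLoop]
    by_cases h9 : v > 9
    · have hk2 : 2 ≤ k := small_k v k hv h9
      rw [dif_pos h9]
      by_cases heq : pvDig v 0 = pvDig v (k - 1)
      · rw [if_pos ((cond_iff v k (by omega) hv).mpr heq.symm)]
        simp only [Bool.false_eq_true, false_iff]
        intro hB
        exact hB 0 (by omega) (by simpa using heq)
      · rw [if_neg (fun h => heq ((cond_iff v k (by omega) hv).mp h).symm)]
        have hv' : v % 10 ^ (k - 1) / 10 < 10 ^ (k - 2) := strip_lt v k hk2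
        have hlt : v % 10 ^ (k - 1) / 10 < v := by
          calc v % 10 ^ (k - 1) / 10 ≤ v / 10 := Nat.div_le_div_right (Nat.mod_le _ _)
            _ < v := Nat.div_lt_self (by omega) (by norm_num)
        have hD' : ¬ Dpred (v % 10 ^ (k - 1) / 10) (k - 2) :=
          fun h => hD (Dpred_strip_mpr v k hk2 heq h)
        rw [ih _ hlt (k - 2) hv' hD']
        exact Bpred_strip v k hk2 heq
    · rw [dif_neg h9]
      simp only [true_iff]
      intro i hi hcontra
      apply hD
      refine ⟨0, by omega, ?_, i, by omega, hi, hcontra⟩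
      intro p hp _
      have : v < 10 ^ p := by
        calc v < 10 := by omega
          _ ≤ 10 ^ p := by
            calc (10 : Nat) = 10 ^ 1 := (pow_one 10).symm
              _ ≤ 10 ^ p := Nat.pow_le_pow_right (by norm_num) (by omega)
      simp [pvDig, Nat.div_eq_of_lt this]

-- under Dpred, A's loop returns true (the early exit fires before any equal pair is seen)
theorem aLoop_of_Dpred (v : Nat) : ∀ k, v < 10 ^ k → Dpred v k → aLoop v k = true := by
  induction v using Nat.strong_induction_on with
  | _ v ih =>
    intro k hv hD
    rw [aLoop]
    by_cases h9 : v > 9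
    · have hk2 : 2 ≤ k := small_k v k hv h9
      have hne : pvDig v 0 ≠ pvDig v (k - 1) :=
        fun heq => not_Dpred_of_eq v k hk2 hv h9 heq hD
      rw [dif_pos h9, if_neg (fun h => hne ((cond_iff v k (by omega) hv).mp h).symm)]
      have hlt : v % 10 ^ (k - 1) / 10 < v := by
        calc v % 10 ^ (k - 1) / 10 ≤ v / 10 := Nat.div_le_div_right (Nat.mod_le _ _)
          _ < v := Nat.div_lt_self (by omega) (by norm_num)
      exact ih _ hlt (k - 2) (strip_lt v k hk2) (Dpred_strip_mp v k hk2 hne hD)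
    · rw [dif_neg h9]

-- bridge: B's port returns true exactly when the mirrored-pair predicate holds at the true digit length
theorem alt_true_iff (n : Int) :
    is_antipalindrome_alt n = true ↔ Bpred n.natAbs (Nat.digits 10 n.natAbs).length := by
  unfold is_antipalindrome_alt
  rw [bDigits_eq]
  constructor
  · intro hall i hi
    rw [List.all_eq_true] at hall
    have := hall i (List.mem_range.mpr (by omega))
    rw [digits_getD, digits_getD] at this
    simpa using this
  · intro hB
    simp only [List.all_eq_true, List.mem_range, decide_eq_true_eq]
    intro i hi
    have := hB i (by omega)
    rw [digits_getD, digits_getD]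
    simpa using this

-- bridge: D_ coincides with Dpred at the true digit length (the bounds in D_ are redundant)
theorem D_iff_Dpred (n : Int) :
    D_is_antipalindrome n ↔ Dpred n.natAbs (Nat.digits 10 n.natAbs).length := by
  unfold D_is_antipalindrome Dpred
  constructor
  · rintro ⟨j, -, h1, h2, i, -, hji, hik, heq⟩
    exact ⟨j, h1, fun p hp hp' => h2 p (by omega) hp hp', i, hji, hik, heq⟩
  · rintro ⟨j, h1, h2, i, hji, hik, heq⟩
    exact ⟨j, by omega, h1, fun p _ hp hp' => h2 p hp hp', i, by omega, hji, hik, heq⟩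

-- witness computations (the ports are well-founded recursions, so we unfold them by equation lemmas)
theorem aux_A1000 : is_antipalindrome 1000 = true := by
  show aLoop (Int.natAbs 1000) (aCount (Int.natAbs 1000)) = true
  have h1 : Int.natAbs 1000 = 1000 := rfl
  rw [h1, aCount_eq]
  have h2 : (Nat.digits 10 1000).length = 4 := by decide
  rw [h2, aLoop]
  norm_num
  rw [aLoop]
  norm_num

theorem aux_B1000 : is_antipalindrome_alt 1000 = false := by
  simp only [is_antipalindrome_alt, bDigits_eq]
  decide

-- ===== VERDICT (by name: the statement is the Claim_ definition above) =====
theorem is_antipalindrome_spec : Claim_unchanged_is_antipalindrome := by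
  intro n _ h'
  unfold is_antipalindrome
  rw [aCount_eq]
  have hv := Nat.lt_base_pow_length_digits (b := 10) (m := n.natAbs) (by norm_num)
  have hD : ¬ Dpred n.natAbs (Nat.digits 10 n.natAbs).length :=
    fun h => h' ((D_iff_Dpred n).mpr h)
  by_cases hB : Bpred n.natAbs (Nat.digits 10 n.natAbs).length
  · rw [(aLoop_char _ _ hv hD).mpr hB, ((alt_true_iff n).mpr hB).symm]
  · have hA : aLoop n.natAbs (Nat.digits 10 n.natAbs).length = false := by
      rw [← Bool.not_eq_true]
      exact fun h => hB ((aLoop_char _ _ hv hD).mp h)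
    have halt : is_antipalindrome_alt n = false := by
      rw [← Bool.not_eq_true]
      exact fun h => hB ((alt_true_iff n).mp h)
    rw [hA, halt]

theorem is_antipalindrome_changed : Claim_changed_is_antipalindrome := by
  unfold Claim_changed_is_antipalindrome pvDiffWitness_is_antipalindrome pvDiffWitnessOut_is_antipalindrome
  exact ⟨by decide, by decide, aux_A1000, aux_B1000, by decide⟩

theorem is_antipalindrome_tight : Claim_exact_is_antipalindrome := by
  intro n _ hDn
  have hD := (D_iff_Dpred n).mp hDn
  have hv := Nat.lt_base_pow_length_digits (b := 10) (m := n.natAbs) (by norm_num)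
  have hA : is_antipalindrome n = true := by
    unfold is_antipalindrome
    rw [aCount_eq]
    exact aLoop_of_Dpred _ _ hv hD
  have hB : is_antipalindrome_alt n = false := by
    rw [← Bool.not_eq_true]
    intro h
    obtain ⟨j, -, -, i, -, hik, heq⟩ := hD
    exact (alt_true_iff n).mp h i hik heq
  rw [hA, hB]
  simp
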